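-- pv_equiv track=rewrite | github.com/willyu1007/The-UniAssist-Entrance-App | .ai/skills/features/ui/ui-governance-gate/scripts/ui_gate.py | _parse_braced_expression
-- ===== SOURCE A (Python) =====
-- from typing import Dict, Iterable, List, Optional, Set, Tuple
--
-- def _parse_braced_expression(text: str, start: int) -> Tuple[Optional[str], int]:
--     """Parse a { ... } expression starting at `start` (must be '{').
--
--     Returns (inner_text, end_index_exclusive). If unparseable, inner_text is None.
--     """
--     if start >= len(text) or text[start] != "{":
--         return None, start
--     depth = 0
--     i = start
--     in_s = False
--     in_d = False
--     in_t = False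
--     while i < len(text):
--         c = text[i]
--         if in_s:
--             if c == "\\":
--                 i += 2
--                 continue
--             if c == "'":
--                 in_s = False
--             i += 1
--             continue
--         if in_d:
--             if c == "\\":
--                 i += 2
--                 continue
--             if c == '"':
--                 in_d = False
--             i += 1
--             continue
--         if in_t:
--             if c == "\\":
--                 i += 2
--                 continue
--             if c == "`":
--                 in_t = False
--                 i += 1
--                 continue
--             i += 1
--             continue
--
--         # Not in a quoted region
--         if c == "'":
--             in_s = True
--             i += 1
--             continue
--         if c == '"':
--             in_d = True
--             i += 1
--             continue
--         if c == "`":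
--             in_t = True
--             i += 1
--             continue
--         if c == "{":
--             depth += 1
--             i += 1
--             continue
--         if c == "}":
--             depth -= 1
--             if depth == 0:
--                 return text[start + 1 : i], i + 1
--             i += 1
--             continue
--         i += 1
--
--     return None, i
-- ===== SOURCE B (Python) =====
-- def _skip_quoted(text, j, quote):
--     """Advance j past a quoted region opened by `quote` (j is just after the
--     opening quote); backslash skips the next char; returns the index just past
--     the closing quote, or an index >= len(text) if unterminated."""
--     n = len(text)
--     while j < n:
--         c = text[j]
--         if c == "\\":
--             j += 2
--         elif c == quote:
--             return j + 1
--         else: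
--             j += 1
--     return j
--
--
-- def _scan_braces(text, i):
--     """Stage 1: tokenize. Return the list of (position, char) of every '{' / '}'
--     lying outside quoted regions from index i on, plus the final scan index."""
--     n = len(text)
--     events = []
--     while i < n:
--         c = text[i]
--         if c == "'" or c == '"' or c == "`":
--             i = _skip_quoted(text, i + 1, c)
--         else:
--             if c == "{" or c == "}":
--                 events.append((i, c))
--             i += 1
--     return events, i
--
--
-- def _parse_braced_expression(text, start):
--     if start >= len(text) or text[start] != "{":
--         return None, start
--     # Stage 2: match braces over the token list only.
--     events, end = _scan_braces(text, start)
--     depth = 0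
--     for p, c in events:
--         if c == "{":
--             depth += 1
--         else:
--             depth -= 1
--             if depth == 0:
--                 return text[start + 1 : p], p + 1
--     return None, end
-- ===== Notes on version B (the rewrite author's own statement) =====
-- stated objective: alternative
-- what changed: Replaced A's single interleaved scan (depth counter plus three in-quote boolean flags updated character by character) by a staged pipeline: a tokenizer pass that extracts the list of brace events outside quoted regions (with a _skip_quoted helper consuming each quoted span), followed by a separate matcher pass that walks only the event list counting depth.
-- outside the precondition, e.g. on _parse_braced_expression('{ab', -9): A raises IndexError, B raises IndexError
import Mathlib
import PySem

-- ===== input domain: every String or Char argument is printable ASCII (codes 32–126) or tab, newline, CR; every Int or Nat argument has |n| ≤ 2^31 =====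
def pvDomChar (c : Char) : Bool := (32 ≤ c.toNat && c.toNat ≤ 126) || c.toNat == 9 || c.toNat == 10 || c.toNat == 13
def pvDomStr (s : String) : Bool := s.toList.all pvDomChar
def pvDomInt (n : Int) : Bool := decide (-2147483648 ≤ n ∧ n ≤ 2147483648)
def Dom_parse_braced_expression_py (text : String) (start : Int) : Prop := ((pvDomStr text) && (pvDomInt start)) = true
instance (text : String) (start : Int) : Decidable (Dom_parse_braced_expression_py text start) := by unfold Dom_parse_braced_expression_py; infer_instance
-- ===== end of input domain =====

-- B replaces A's single interleaved scan (depth + three in-quote flags) by two stages: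
-- a tokenizer extracting brace events outside quoted regions, then a matcher over the
-- event list; objective: alternative decomposition, same O(n) cost.


-- ===== PORT A =====
-- tiny decreasing-measure lemmas, cited by name in the ports' decreasing_by
-- (keeps the lifted termination proofs small)
theorem pvDec1 (L i : Int) (h : i < L) : (L - (i+1)).toNat < (L - i).toNat := by omega
theorem pvDec2 (L i : Int) (h : i < L) : (L - (i+2)).toNat < (L - i).toNat := by omega
theorem pvDecSkip (L i j : Int) (h : i < L) (hj : i + 1 ≤ j) : (L - j).toNat < (L - i).toNat := by omega

-- A's single while-loop, carrying depth and the three in-quote flags.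
def pvLoopA (s : List Char) (start : Int) (depth i : Int) (in_s in_d in_t : Bool) :
    Option String × Int :=
  if _h : i < (s.length : Int) then
    match PySem.List.pyGet? s i with
    | none => (none, i)   -- Python IndexError (i < -len); unreachable under Pre_
    | some c =>
      if in_s then
        if c = '\\' then pvLoopA s start depth (i+2) in_s in_d in_t
        else if c = '\'' then pvLoopA s start depth (i+1) false in_d in_t
        else pvLoopA s start depth (i+1) in_s in_d in_t
      else if in_d then
        if c = '\\' then pvLoopA s start depth (i+2) in_s in_d in_t
        else if c = '"' then pvLoopA s start depth (i+1) in_s false in_t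
        else pvLoopA s start depth (i+1) in_s in_d in_t
      else if in_t then
        if c = '\\' then pvLoopA s start depth (i+2) in_s in_d in_t
        else if c = '`' then pvLoopA s start depth (i+1) in_s in_d false
        else pvLoopA s start depth (i+1) in_s in_d in_t
      else if c = '\'' then pvLoopA s start depth (i+1) true in_d in_t
      else if c = '"' then pvLoopA s start depth (i+1) in_s true in_t
      else if c = '`' then pvLoopA s start depth (i+1) in_s in_d true
      else if c = '{' then pvLoopA s start (depth+1) (i+1) in_s in_d in_t
      else if c = '}' then
        if depth - 1 = 0 then
          (some (String.ofList (PySem.List.slice s (some (start+1)) (some i))), i+1)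
        else pvLoopA s start (depth-1) (i+1) in_s in_d in_t
      else pvLoopA s start depth (i+1) in_s in_d in_t
  else (none, i)
termination_by ((s.length : Int) - i).toNat
decreasing_by all_goals first | exact pvDec2 _ _ _h | exact pvDec1 _ _ _h

def parse_braced_expression_py (text : String) (start : Int) : Option String × Int :=
  if start ≥ PySem.Str.len text then (none, start)
  else match PySem.Str.pyGet? text start with
    | none => (none, start)   -- Python IndexError (start < -len); excluded by Pre_
    | some c =>
      if c ≠ '{' then (none, start)
      else pvLoopA text.toList start 0 start false false false

-- ===== PORT B =====
-- B's helper _skip_quoted: consume a quoted region, return index past the close quote.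
def pvSkipQuoted (s : List Char) (j : Int) (q : Char) : Int :=
  if _h : j < (s.length : Int) then
    match PySem.List.pyGet? s j with
    | none => j   -- Python IndexError (j < -len); unreachable under Pre_
    | some c =>
      if c = '\\' then pvSkipQuoted s (j+2) q
      else if c = q then j + 1
      else pvSkipQuoted s (j+1) q
  else j
termination_by ((s.length : Int) - j).toNat
decreasing_by all_goals first | exact pvDec2 _ _ _h | exact pvDec1 _ _ _h

-- needed by pvScanBraces' termination proof (cited in decreasing_by)
theorem le_pvSkipQuoted (s : List Char) (j : Int) (q : Char) : j ≤ pvSkipQuoted s j q := by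
  fun_induction pvSkipQuoted s j q <;> omega

-- Stage 1 (_scan_braces' while-loop, with its accumulating events list):
-- collect the (position, char) of every brace outside quoted regions, plus the end index.
def pvScanBraces (s : List Char) (i : Int) (events : List (Int × Char)) :
    List (Int × Char) × Int :=
  if _h : i < (s.length : Int) then
    match PySem.List.pyGet? s i with
    | none => (events, i)   -- Python IndexError (i < -len); unreachable under Pre_
    | some c =>
      if c = '\'' ∨ c = '"' ∨ c = '`' then pvScanBraces s (pvSkipQuoted s (i+1) c) events
      else if c = '{' ∨ c = '}' then pvScanBraces s (i+1) (events ++ [(i, c)])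
      else pvScanBraces s (i+1) events
  else (events, i)
termination_by ((s.length : Int) - i).toNat
decreasing_by
  · exact pvDecSkip _ _ _ _h (le_pvSkipQuoted s (i+1) c)
  all_goals exact pvDec1 _ _ _h

-- Stage 2 (the for-loop over events): count depth over the event list only.
def pvMatchBraces (s : List Char) (start depth : Int)
    (events : List (Int × Char)) (endIdx : Int) : Option String × Int :=
  match events with
  | [] => (none, endIdx)
  | (p, c) :: rest =>
    if c = '{' then pvMatchBraces s start (depth+1) rest endIdx
    else
      if depth - 1 = 0 then
        (some (String.ofList (PySem.List.slice s (some (start+1)) (some p))), p+1)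
      else pvMatchBraces s start (depth-1) rest endIdx

def parse_braced_expression_py_alt (text : String) (start : Int) : Option String × Int :=
  if start ≥ PySem.Str.len text then (none, start)
  else match PySem.Str.pyGet? text start with
    | none => (none, start)   -- Python IndexError (start < -len); excluded by Pre_
    | some c =>
      if c ≠ '{' then (none, start)
      else
        let r := pvScanBraces text.toList start []
        pvMatchBraces text.toList start 0 r.1 r.2

-- ===== PRECONDITION & SPEC =====
-- Pre_ excludes exactly the inputs with start < -len(text), on which Python's
-- text[start] raises IndexError (A returns no value there).
def Pre_parse_braced_expression_py (text : String) (start : Int) : Prop :=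
  -(text.toList.length : Int) ≤ start
instance (text : String) (start : Int) : Decidable (Pre_parse_braced_expression_py text start) := by
  unfold Pre_parse_braced_expression_py; infer_instance

def pvWitness_parse_braced_expression_py : String × Int := ("{a}", 0)

def Spec_parse_braced_expression_py (text : String) (start : Int) (out : Option String × Int) : Prop := out = parse_braced_expression_py_alt text start
instance (text : String) (start : Int) (out : Option String × Int) : Decidable (Spec_parse_braced_expression_py text start out) := by unfold Spec_parse_braced_expression_py; infer_instance

-- ===== CLAIM (what is proved, stated in full; the proofs are below) =====
def Claim_equal_parse_braced_expression_py : Prop := ∀ (text : String) (start : Int), Dom_parse_braced_expression_py text start → Pre_parse_braced_expression_py text start → Spec_parse_braced_expression_py text start (parse_braced_expression_py text start)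

-- ===== LEMMAS AND PROOFS =====

-- the accumulator of pvScanBraces is a prefix of the result
theorem pvScanBraces_acc (s : List Char) :
    ∀ (n : Nat) (i : Int), ((s.length : Int) - i).toNat ≤ n → ∀ (acc : List (Int × Char)),
      pvScanBraces s i acc = (acc ++ (pvScanBraces s i []).1, (pvScanBraces s i []).2) := by
  intro n
  induction n with
  | zero =>
    intro i hi acc
    have hge : ¬ i < (s.length : Int) := by omega
    have h0 : pvScanBraces s i ([] : List (Int × Char)) = ([], i) := by
      rw [pvScanBraces]; simp [hge]
    rw [pvScanBraces]; simp [hge, h0]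
  | succ n IH =>
    intro i hi acc
    by_cases hlt : i < (s.length : Int)
    · rcases hG : PySem.List.pyGet? s i with _ | c
      · have h0 : pvScanBraces s i ([] : List (Int × Char)) = ([], i) := by
          rw [pvScanBraces]; simp [hlt, hG]
        rw [pvScanBraces]; simp [hlt, hG, h0]
      · by_cases hq : c = '\'' ∨ c = '"' ∨ c = '`'
        · have hskip := le_pvSkipQuoted s (i+1) c
          conv_lhs => rw [pvScanBraces]
          conv_rhs => rw [pvScanBraces]
          simp only [hlt, dif_pos, hG, if_pos hq]
          exact IH _ (by omega) acc
        · by_cases hb : c = '{' ∨ c = '}'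
          · conv_lhs => rw [pvScanBraces]
            conv_rhs => rw [pvScanBraces]
            simp only [hlt, dif_pos, hG, if_neg hq, if_pos hb]
            rw [IH (i+1) (by omega) (acc ++ [(i, c)]),
                IH (i+1) (by omega) ([] ++ [(i, c)])]
            simp
          · conv_lhs => rw [pvScanBraces]
            conv_rhs => rw [pvScanBraces]
            simp only [hlt, dif_pos, hG, if_neg hq, if_neg hb]
            exact IH (i+1) (by omega) acc
    · have h0 : pvScanBraces s i ([] : List (Int × Char)) = ([], i) := by
        rw [pvScanBraces]; simp [hlt]
      rw [pvScanBraces]; simp [hlt, h0]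

-- A's loop in the in_s state from index i equals the neutral loop resumed at the
-- index B's helper skips to (for the single-quote region).
theorem pvLoopA_in_s (s : List Char) (start depth : Int) :
    ∀ (n : Nat) (i : Int), ((s.length : Int) - i).toNat ≤ n →
      pvLoopA s start depth i true false false =
      pvLoopA s start depth (pvSkipQuoted s i '\'') false false false := by
  intro n
  induction n with
  | zero =>
    intro i hi
    have hge : ¬ i < (s.length : Int) := by omega
    have hs : pvSkipQuoted s i '\'' = i := by rw [pvSkipQuoted]; simp [hge]
    rw [hs]
    conv_lhs => rw [pvLoopA]
    conv_rhs => rw [pvLoopA]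
    simp [hge]
  | succ n IH =>
    intro i hi
    by_cases hlt : i < (s.length : Int)
    · rcases hG : PySem.List.pyGet? s i with _ | c
      · have hs : pvSkipQuoted s i '\'' = i := by rw [pvSkipQuoted]; simp [hlt, hG]
        rw [hs]
        conv_lhs => rw [pvLoopA]
        conv_rhs => rw [pvLoopA]
        simp [hlt, hG]
      · by_cases hb : c = '\\'
        · have hs : pvSkipQuoted s i '\'' = pvSkipQuoted s (i+2) '\'' := by
            conv_lhs => rw [pvSkipQuoted]
            simp [hlt, hG, hb]
          have hl : pvLoopA s start depth i true false false =
              pvLoopA s start depth (i+2) true false false := by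
            conv_lhs => rw [pvLoopA]
            simp [hlt, hG, hb]
          rw [hl, hs]
          exact IH (i+2) (by omega)
        · by_cases hq : c = '\''
          · have hs : pvSkipQuoted s i '\'' = i + 1 := by
              rw [pvSkipQuoted]; simp [hlt, hG, hb, hq]
            have hl : pvLoopA s start depth i true false false =
                pvLoopA s start depth (i+1) false false false := by
              conv_lhs => rw [pvLoopA]
              simp [hlt, hG, hb, hq]
            rw [hl, hs]
          · have hs : pvSkipQuoted s i '\'' = pvSkipQuoted s (i+1) '\'' := by
              conv_lhs => rw [pvSkipQuoted]
              simp [hlt, hG, hb, hq]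
            have hl : pvLoopA s start depth i true false false =
                pvLoopA s start depth (i+1) true false false := by
              conv_lhs => rw [pvLoopA]
              simp [hlt, hG, hb, hq]
            rw [hl, hs]
            exact IH (i+1) (by omega)
    · have hs : pvSkipQuoted s i '\'' = i := by rw [pvSkipQuoted]; simp [hlt]
      rw [hs]
      conv_lhs => rw [pvLoopA]
      conv_rhs => rw [pvLoopA]
      simp [hlt]

-- the same for the double-quote state
theorem pvLoopA_in_d (s : List Char) (start depth : Int) :
    ∀ (n : Nat) (i : Int), ((s.length : Int) - i).toNat ≤ n →
      pvLoopA s start depth i false true false =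
      pvLoopA s start depth (pvSkipQuoted s i '"') false false false := by
  intro n
  induction n with
  | zero =>
    intro i hi
    have hge : ¬ i < (s.length : Int) := by omega
    have hs : pvSkipQuoted s i '"' = i := by rw [pvSkipQuoted]; simp [hge]
    rw [hs]
    conv_lhs => rw [pvLoopA]
    conv_rhs => rw [pvLoopA]
    simp [hge]
  | succ n IH =>
    intro i hi
    by_cases hlt : i < (s.length : Int)
    · rcases hG : PySem.List.pyGet? s i with _ | c
      · have hs : pvSkipQuoted s i '"' = i := by rw [pvSkipQuoted]; simp [hlt, hG]
        rw [hs]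
        conv_lhs => rw [pvLoopA]
        conv_rhs => rw [pvLoopA]
        simp [hlt, hG]
      · by_cases hb : c = '\\'
        · have hs : pvSkipQuoted s i '"' = pvSkipQuoted s (i+2) '"' := by
            conv_lhs => rw [pvSkipQuoted]
            simp [hlt, hG, hb]
          have hl : pvLoopA s start depth i false true false =
              pvLoopA s start depth (i+2) false true false := by
            conv_lhs => rw [pvLoopA]
            simp [hlt, hG, hb]
          rw [hl, hs]
          exact IH (i+2) (by omega)
        · by_cases hq : c = '"'
          · have hs : pvSkipQuoted s i '"' = i + 1 := by
              rw [pvSkipQuoted]; simp [hlt, hG, hb, hq]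
            have hl : pvLoopA s start depth i false true false =
                pvLoopA s start depth (i+1) false false false := by
              conv_lhs => rw [pvLoopA]
              simp [hlt, hG, hb, hq]
            rw [hl, hs]
          · have hs : pvSkipQuoted s i '"' = pvSkipQuoted s (i+1) '"' := by
              conv_lhs => rw [pvSkipQuoted]
              simp [hlt, hG, hb, hq]
            have hl : pvLoopA s start depth i false true false =
                pvLoopA s start depth (i+1) false true false := by
              conv_lhs => rw [pvLoopA]
              simp [hlt, hG, hb, hq]
            rw [hl, hs]
            exact IH (i+1) (by omega)
    · have hs : pvSkipQuoted s i '"' = i := by rw [pvSkipQuoted]; simp [hlt]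
      rw [hs]
      conv_lhs => rw [pvLoopA]
      conv_rhs => rw [pvLoopA]
      simp [hlt]

-- the same for the backtick state
theorem pvLoopA_in_t (s : List Char) (start depth : Int) :
    ∀ (n : Nat) (i : Int), ((s.length : Int) - i).toNat ≤ n →
      pvLoopA s start depth i false false true =
      pvLoopA s start depth (pvSkipQuoted s i '`') false false false := by
  intro n
  induction n with
  | zero =>
    intro i hi
    have hge : ¬ i < (s.length : Int) := by omega
    have hs : pvSkipQuoted s i '`' = i := by rw [pvSkipQuoted]; simp [hge]
    rw [hs]
    conv_lhs => rw [pvLoopA]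
    conv_rhs => rw [pvLoopA]
    simp [hge]
  | succ n IH =>
    intro i hi
    by_cases hlt : i < (s.length : Int)
    · rcases hG : PySem.List.pyGet? s i with _ | c
      · have hs : pvSkipQuoted s i '`' = i := by rw [pvSkipQuoted]; simp [hlt, hG]
        rw [hs]
        conv_lhs => rw [pvLoopA]
        conv_rhs => rw [pvLoopA]
        simp [hlt, hG]
      · by_cases hb : c = '\\'
        · have hs : pvSkipQuoted s i '`' = pvSkipQuoted s (i+2) '`' := by
            conv_lhs => rw [pvSkipQuoted]
            simp [hlt, hG, hb]
          have hl : pvLoopA s start depth i false false true =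
              pvLoopA s start depth (i+2) false false true := by
            conv_lhs => rw [pvLoopA]
            simp [hlt, hG, hb]
          rw [hl, hs]
          exact IH (i+2) (by omega)
        · by_cases hq : c = '`'
          · have hs : pvSkipQuoted s i '`' = i + 1 := by
              rw [pvSkipQuoted]; simp [hlt, hG, hb, hq]
            have hl : pvLoopA s start depth i false false true =
                pvLoopA s start depth (i+1) false false false := by
              conv_lhs => rw [pvLoopA]
              simp [hlt, hG, hb, hq]
            rw [hl, hs]
          · have hs : pvSkipQuoted s i '`' = pvSkipQuoted s (i+1) '`' := by
              conv_lhs => rw [pvSkipQuoted]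
              simp [hlt, hG, hb, hq]
            have hl : pvLoopA s start depth i false false true =
                pvLoopA s start depth (i+1) false false true := by
              conv_lhs => rw [pvLoopA]
              simp [hlt, hG, hb, hq]
            rw [hl, hs]
            exact IH (i+1) (by omega)
    · have hs : pvSkipQuoted s i '`' = i := by rw [pvSkipQuoted]; simp [hlt]
      rw [hs]
      conv_lhs => rw [pvLoopA]
      conv_rhs => rw [pvLoopA]
      simp [hlt]

-- main lemma: A's loop in the neutral state equals B's matcher applied to B's scan.
theorem pvLoopA_eq_scan_match (s : List Char) (start : Int) :
    ∀ (n : Nat) (depth i : Int), ((s.length : Int) - i).toNat ≤ n →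
      pvLoopA s start depth i false false false =
      pvMatchBraces s start depth (pvScanBraces s i []).1 (pvScanBraces s i []).2 := by
  intro n
  induction n with
  | zero =>
    intro depth i hi
    have hge : ¬ i < (s.length : Int) := by omega
    rw [pvLoopA, pvScanBraces]; simp [hge, pvMatchBraces]
  | succ n IH =>
    intro depth i hi
    by_cases hlt : i < (s.length : Int)
    · rcases hG : PySem.List.pyGet? s i with _ | c
      · rw [pvLoopA, pvScanBraces]; simp [hlt, hG, pvMatchBraces]
      · by_cases hq : c = '\'' ∨ c = '"' ∨ c = '`'
        · have hS : pvScanBraces s i [] = pvScanBraces s (pvSkipQuoted s (i+1) c) [] := by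
            conv_lhs => rw [pvScanBraces]
            simp only [hlt, dif_pos, hG, if_pos hq]
          rw [hS]
          have hskip := le_pvSkipQuoted s (i+1) c
          have hm : ((s.length : Int) - pvSkipQuoted s (i+1) c).toNat ≤ n := by omega
          rcases hq with hq | hq | hq
          · subst hq
            have hl : pvLoopA s start depth i false false false =
                pvLoopA s start depth (i+1) true false false := by
              conv_lhs => rw [pvLoopA]
              simp [hlt, hG]
            rw [hl, pvLoopA_in_s s start depth n (i+1) (by omega)]
            exact IH depth _ hm
          · subst hq
            have hl : pvLoopA s start depth i false false false =
                pvLoopA s start depth (i+1) false true false := by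
              conv_lhs => rw [pvLoopA]
              simp [hlt, hG]
            rw [hl, pvLoopA_in_d s start depth n (i+1) (by omega)]
            exact IH depth _ hm
          · subst hq
            have hl : pvLoopA s start depth i false false false =
                pvLoopA s start depth (i+1) false false true := by
              conv_lhs => rw [pvLoopA]
              simp [hlt, hG]
            rw [hl, pvLoopA_in_t s start depth n (i+1) (by omega)]
            exact IH depth _ hm
        · have h1 : c ≠ '\'' := fun h => hq (Or.inl h)
          have h2 : c ≠ '"' := fun h => hq (Or.inr (Or.inl h))
          have h3 : c ≠ '`' := fun h => hq (Or.inr (Or.inr h))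
          by_cases hb : c = '{' ∨ c = '}'
          · have hS : pvScanBraces s i [] =
                ((i, c) :: (pvScanBraces s (i+1) []).1, (pvScanBraces s (i+1) []).2) := by
              conv_lhs => rw [pvScanBraces]
              simp only [hlt, dif_pos, hG, if_neg hq, if_pos hb, List.nil_append]
              rw [pvScanBraces_acc s (((s.length : Int) - (i+1)).toNat) (i+1) le_rfl [(i, c)]]
              simp
            rw [hS]
            rcases hb with hb | hb
            · subst hb
              have hl : pvLoopA s start depth i false false false =
                  pvLoopA s start (depth+1) (i+1) false false false := by
                conv_lhs => rw [pvLoopA]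
                simp [hlt, hG, h1, h2, h3]
              rw [hl, pvMatchBraces]
              exact IH (depth+1) (i+1) (by omega)
            · subst hb
              by_cases hd : depth - 1 = 0
              · conv_lhs => rw [pvLoopA]
                rw [pvMatchBraces]
                simp [hlt, hG, h1, h2, h3, hd]
              · have hl : pvLoopA s start depth i false false false =
                    pvLoopA s start (depth-1) (i+1) false false false := by
                  conv_lhs => rw [pvLoopA]
                  simp [hlt, hG, h1, h2, h3, hd]
                rw [hl, pvMatchBraces]
                simp only [if_neg (by decide : ¬ ('}' = '{')), if_neg hd]
                exact IH (depth-1) (i+1) (by omega)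
          · have hS : pvScanBraces s i [] = pvScanBraces s (i+1) [] := by
              conv_lhs => rw [pvScanBraces]
              simp only [hlt, dif_pos, hG, if_neg hq, if_neg hb]
            have h4 : c ≠ '{' := fun h => hb (Or.inl h)
            have h5 : c ≠ '}' := fun h => hb (Or.inr h)
            have hl : pvLoopA s start depth i false false false =
                pvLoopA s start depth (i+1) false false false := by
              conv_lhs => rw [pvLoopA]
              simp [hlt, hG, h1, h2, h3, h4, h5]
            rw [hl, hS]
            exact IH depth (i+1) (by omega)
    · rw [pvLoopA, pvScanBraces]; simp [hlt, pvMatchBraces]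

-- ===== VERDICT (by name: the statement is the Claim_ definition above) =====
theorem parse_braced_expression_py_spec : Claim_equal_parse_braced_expression_py := by
  intro text start _hDom _hPre
  unfold Spec_parse_braced_expression_py
  unfold parse_braced_expression_py parse_braced_expression_py_alt
  rw [pvLoopA_eq_scan_match text.toList start (((text.toList.length : Int) - start).toNat) 0 start (by omega)]
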